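-- pv_equiv track=rewrite | github.com/DevSeongmin/Algorithm-JAVA-python- | Python/프로그래머스/[1차] 프렌즈 4블록.py | fall
-- ===== SOURCE A (Python) =====
-- def fall(x,y,board):
--     '''2*2 블럭이 모두 같아 없애준 후 나머지 공백을 떨어뜨리는 함수'''
--     for idx, i in enumerate(board):
--         if '' in i:
--             new = [''] * i.count('')
--
--             for j in i:
--                 if j != '':
--                     new.append(j)
--             board[idx] = new
--     return board
-- ===== SOURCE B (Python) =====
-- def fall(x, y, board):
--     # Build each row anew by a single backward pass: prepend non-empty cells
--     # (preserving order), then pad the front with empties by length difference.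
--     out = []
--     for row in board:
--         new = []
--         for k in range(len(row) - 1, -1, -1):
--             if row[k] != '':
--                 new = [row[k]] + new
--         out.append([''] * (len(row) - len(new)) + new)
--     return out
-- ===== Notes on version B (the rewrite author's own statement) =====
-- stated objective: alternative
-- what changed: replaced A's guarded in-place two-bucket rebuild (count empties then re-append non-empties forward) by building a fresh board: each row is rebuilt unconditionally with one backward pass prepending non-empty cells, then front-padded with empties computed from the length difference
import Mathlib
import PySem

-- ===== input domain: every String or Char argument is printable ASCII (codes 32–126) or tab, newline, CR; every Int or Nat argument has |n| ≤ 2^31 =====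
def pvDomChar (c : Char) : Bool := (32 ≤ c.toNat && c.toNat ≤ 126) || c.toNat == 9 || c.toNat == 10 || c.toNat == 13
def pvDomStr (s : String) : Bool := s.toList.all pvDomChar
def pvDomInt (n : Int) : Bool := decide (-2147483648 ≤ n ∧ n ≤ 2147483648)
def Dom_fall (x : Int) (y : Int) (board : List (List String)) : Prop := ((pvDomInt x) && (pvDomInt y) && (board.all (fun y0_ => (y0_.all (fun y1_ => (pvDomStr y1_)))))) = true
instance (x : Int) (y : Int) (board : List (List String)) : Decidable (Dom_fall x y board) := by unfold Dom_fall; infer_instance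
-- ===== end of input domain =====

-- B builds a fresh board, rebuilding every row by one backward pass that prepends non-empty
-- cells and then front-pads with empties from the length difference, instead of A's guarded
-- count-empties-then-re-append rebuild (objective: alternative).
-- A mutates `board` in place (reassigns rows), B does not; the equivalence is about the return value.

-- ===== PORT A =====
-- for idx, i in enumerate(board): if '' in i: new = ['']*i.count(''); for j in i: if j != '': new.append(j); board[idx] = new
def fall (x : Int) (y : Int) (board : List (List String)) : List (List String) :=
  board.map (fun i =>
    if "" ∈ i then
      i.foldl (fun new j => if j ≠ "" then new ++ [j] else new)
        (List.replicate (PySem.List.count i "") "")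
    else i)

-- ===== PORT B =====
-- inner backward loop 'for k in range(len(row)-1,-1,-1): if row[k] != '': new = [row[k]] + new'
-- is exactly a right fold over the row (processes cells from the right, prepending)
def fallRows : List (List String) → List (List String)
  | [] => []
  | row :: rs =>
      let new := row.foldr (fun c acc => if c ≠ "" then c :: acc else acc) []
      (List.replicate (row.length - new.length) "" ++ new) :: fallRows rs

def fall_alt (x : Int) (y : Int) (board : List (List String)) : List (List String) :=
  fallRows board

-- ===== PRECONDITION & SPEC =====
def Spec_fall (x : Int) (y : Int) (board : List (List String)) (out : List (List String)) : Prop := out = fall_alt x y board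
instance (x : Int) (y : Int) (board : List (List String)) (out : List (List String)) : Decidable (Spec_fall x y board out) := by unfold Spec_fall; infer_instance

-- ===== CLAIM =====
def Claim_equal_fall : Prop := ∀ (x : Int) (y : Int) (board : List (List String)), Dom_fall x y board → Spec_fall x y board (fall x y board)

-- ===== LEMMAS AND PROOFS =====

-- B's backward prepend pass collects exactly the non-empty cells in order
theorem pv_foldr_filter (i : List String) :
    i.foldr (fun c acc => if c ≠ "" then c :: acc else acc) []
      = i.filter (fun j => decide (j ≠ "")) := by
  induction i with
  | nil => rfl
  | cons c cs ih =>
    rw [List.foldr_cons, ih, List.filter_cons]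
    by_cases h : c = "" <;> simp [h]

-- non-empty cells plus empty cells account for the whole row
theorem pv_len_sum (i : List String) :
    (i.filter (fun j => decide (j ≠ ""))).length + PySem.List.count i "" = i.length := by
  induction i with
  | nil => rfl
  | cons c cs ih =>
    by_cases h : c = "" <;>
      simp [PySem.List.count, h] at ih ⊢ <;> omega

-- A's empty-count equals the length difference B uses
theorem pv_count_len (i : List String) :
    PySem.List.count i "" = i.length - (i.filter (fun j => decide (j ≠ ""))).length := by
  have := pv_len_sum i; omega

-- the two row rewrites agree on every row
theorem pv_row (i : List String) :
    (if "" ∈ i then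
        i.foldl (fun new j => if j ≠ "" then new ++ [j] else new)
          (List.replicate (PySem.List.count i "") "")
      else i)
    = List.replicate (i.length - (i.foldr (fun c acc => if c ≠ "" then c :: acc else acc) []).length) ""
        ++ i.foldr (fun c acc => if c ≠ "" then c :: acc else acc) [] := by
  rw [pv_foldr_filter]
  by_cases h : "" ∈ i
  · rw [if_pos h,
      PySem.List.foldl_append_ite_eq_filter (p := fun j => j ≠ "")
        (l := i) (acc := List.replicate (PySem.List.count i "") ""),
      pv_count_len]
  · rw [if_neg h]
    have hf : i.filter (fun j => decide (j ≠ "")) = i := by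
      apply List.filter_eq_self.mpr
      intro a ha
      simp only [decide_eq_true_eq]
      intro hc; exact h (hc ▸ ha)
    rw [hf, Nat.sub_self]
    rfl

-- ===== VERDICT =====
theorem fall_spec : Claim_equal_fall := by
  intro x y board hD
  clear hD
  unfold Spec_fall fall fall_alt
  induction board with
  | nil => rfl
  | cons row rs ih =>
    simp only [List.map_cons, fallRows]
    rw [ih, pv_row row]
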